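-- pv_equiv track=rewrite | github.com/microsoft/DeepSpeed | deepspeed/launcher/launcher_helper.py | env_mapping
-- ===== SOURCE A (Python) =====
-- def env_mapping(env, rank_name_list=None, local_rank_name_list=None):
--     rank = None
--     for rank_name in rank_name_list:
--         if rank_name in env:
--             if rank == None:
--                 rank = env.get(rank_name)
--             elif rank != env.get(rank_name):
--                 raise EnvironmentError(f"rank number doesn't match!")
--     if rank == None:
--         raise EnvironmentError(f"rank number is not in current env!")
--     env['RANK'] = rank
--
--     local_rank = None
--     for local_rank_name in local_rank_name_list:
--         if local_rank_name in env:
--             if local_rank == None: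
--                 local_rank = env.get(local_rank_name)
--             elif local_rank != env.get(local_rank_name):
--                 raise EnvironmentError(f"local_rank number doesn't match!")
--     if local_rank == None:
--         raise EnvironmentError(f"rank number is not in current env!")
--     env['LOCAL_RANK'] = local_rank
--
--     return env
-- ===== SOURCE B (Python) =====
-- def env_mapping(env, rank_name_list=None, local_rank_name_list=None):
--     # Simpler: one loop over (name list, target key, mismatch message); per list, collect
--     # the set of present values and decide by its cardinality instead of sequential compares.
--     # Mutates env in place exactly like the original.
--     for names, key, mismatch_msg in ((rank_name_list, 'RANK', "rank number doesn't match!"),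
--                                      (local_rank_name_list, 'LOCAL_RANK', "local_rank number doesn't match!")):
--         vals = {env[n] for n in names if n in env}
--         if not vals:
--             raise EnvironmentError("rank number is not in current env!")
--         if len(vals) > 1:
--             raise EnvironmentError(mismatch_msg)
--         env[key] = vals.pop()
--     return env
-- ===== Notes on version B (the rewrite author's own statement) =====
-- stated objective: simpler
-- what changed: Replaces the two sequential compare-and-raise loops by a single loop over (name list, target key, message) triples that builds the set of present values once and decides by its cardinality (empty = missing, >1 = mismatch, 1 = the value).
import Mathlib
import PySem

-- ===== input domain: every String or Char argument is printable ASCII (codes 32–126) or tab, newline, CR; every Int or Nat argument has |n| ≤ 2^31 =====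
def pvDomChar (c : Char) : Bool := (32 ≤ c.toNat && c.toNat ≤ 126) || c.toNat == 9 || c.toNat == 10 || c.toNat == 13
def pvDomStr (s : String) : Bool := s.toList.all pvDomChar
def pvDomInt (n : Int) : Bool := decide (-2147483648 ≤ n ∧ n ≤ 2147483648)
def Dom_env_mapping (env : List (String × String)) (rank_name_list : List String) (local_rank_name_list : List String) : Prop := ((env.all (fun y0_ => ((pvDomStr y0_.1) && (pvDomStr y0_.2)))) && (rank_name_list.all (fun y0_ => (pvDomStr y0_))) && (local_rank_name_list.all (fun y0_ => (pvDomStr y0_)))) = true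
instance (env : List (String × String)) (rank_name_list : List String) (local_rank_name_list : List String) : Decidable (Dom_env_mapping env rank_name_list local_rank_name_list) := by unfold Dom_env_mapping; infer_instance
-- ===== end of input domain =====

-- B replaces A's two sequential compare-and-raise loops by per-list set-of-present-values
-- cardinality checks ("simpler"); both mutate env in place in Python — equivalence here is
-- about the returned dict (as its item list).

-- ===== PORT A =====
-- the loop 'for rank_name in names: if rank_name in env: …'; state = rank (Option String);
-- outer none = EnvironmentError ("doesn't match"), excluded by Pre_
def rankLoopA (d : PySem.Dict String String) : List String → Option String → Option (Option String)
  | [], rank => some rank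
  | n :: rest, rank =>
    if d.contains n then
      match rank with
      | none => rankLoopA d rest (d.get? n)
      | some r =>
        if d.get? n ≠ some r then none  -- raise EnvironmentError (mismatch)
        else rankLoopA d rest (some r)
    else rankLoopA d rest rank

def env_mapping (env : List (String × String)) (rank_name_list : List String) (local_rank_name_list : List String) : List (String × String) :=
  let d := PySem.Dict.ofList env
  match rankLoopA d rank_name_list none with
  | some (some r) =>
    let d1 := d.insert "RANK" r
    match rankLoopA d1 local_rank_name_list none with
    | some (some lr) => (d1.insert "LOCAL_RANK" lr).items
    | _ => []  -- EnvironmentError paths (mismatch / not in env), excluded by Pre_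
  | _ => []    -- EnvironmentError paths, excluded by Pre_

-- ===== PORT B =====
-- {env[n] for n in names if n in env}
def presentVals (d : PySem.Dict String String) (names : List String) : PySem.Set String :=
  PySem.Set.ofList (names.filterMap (fun n => d.get? n))

def env_mapping_alt (env : List (String × String)) (rank_name_list : List String) (local_rank_name_list : List String) : List (String × String) :=
  let d := PySem.Dict.ofList env
  match presentVals d rank_name_list with
  | [r] =>
    let d1 := d.insert "RANK" r
    match presentVals d1 local_rank_name_list with
    | [lr] => (d1.insert "LOCAL_RANK" lr).items
    | _ => []  -- raise EnvironmentError (empty or >1 values), excluded by Pre_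
  | _ => []

-- ===== PRECONDITION & SPEC =====
-- Pre_ excludes exactly the inputs on which A RAISES EnvironmentError (no name of the list
-- present in the (current) env, or two present names bound to different values); B raises
-- the same errors there.
def Pre_env_mapping (env : List (String × String)) (rank_name_list : List String) (local_rank_name_list : List String) : Prop :=
  let d := PySem.Dict.ofList env
  let vs := rank_name_list.filterMap (fun n => d.get? n)
  vs ≠ [] ∧ (∀ v ∈ vs, v = vs.headD "") ∧
  (let d1 := d.insert "RANK" (vs.headD "")
   let ws := local_rank_name_list.filterMap (fun n => d1.get? n)
   ws ≠ [] ∧ ∀ w ∈ ws, w = ws.headD "")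
instance (env : List (String × String)) (rank_name_list : List String) (local_rank_name_list : List String) : Decidable (Pre_env_mapping env rank_name_list local_rank_name_list) := by unfold Pre_env_mapping; infer_instance

def pvWitness_env_mapping : (List (String × String)) × List String × List String :=
  ([("OMPI_RANK", "3"), ("SLURM_LOCALID", "1")], ["OMPI_RANK"], ["SLURM_LOCALID"])

def Spec_env_mapping (env : List (String × String)) (rank_name_list : List String) (local_rank_name_list : List String) (out : List (String × String)) : Prop := out = env_mapping_alt env rank_name_list local_rank_name_list
instance (env : List (String × String)) (rank_name_list : List String) (local_rank_name_list : List String) (out : List (String × String)) : Decidable (Spec_env_mapping env rank_name_list local_rank_name_list out) := by unfold Spec_env_mapping; infer_instance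

-- ===== CLAIM (what is proved, stated in full; the proofs are below) =====
def Claim_equal_env_mapping : Prop := ∀ (env : List (String × String)) (rank_name_list : List String) (local_rank_name_list : List String), Dom_env_mapping env rank_name_list local_rank_name_list → Pre_env_mapping env rank_name_list local_rank_name_list → Spec_env_mapping env rank_name_list local_rank_name_list (env_mapping env rank_name_list local_rank_name_list)

-- ===== LEMMAS AND PROOFS =====

lemma contains_iff_get?_isSome (d : PySem.Dict String String) (n : String) :
    d.contains n = (d.get? n).isSome := by
  cases hc : d.contains n
  · have h := (PySem.Dict.get?_eq_none_iff_contains d n).mpr hc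
    simp [h]
  · cases hg : d.get? n with
    | none =>
      have h := (PySem.Dict.get?_eq_none_iff_contains d n).mp hg
      rw [h] at hc; exact absurd hc (by simp)
    | some x => simp

lemma rankLoopA_some (d : PySem.Dict String String) (names : List String) (r : String)
    (h : ∀ v ∈ names.filterMap (fun n => d.get? n), v = r) :
    rankLoopA d names (some r) = some (some r) := by
  induction names with
  | nil => rfl
  | cons n rest ih =>
    cases hg : d.get? n with
    | none =>
      have hc : d.contains n = false := by
        rw [contains_iff_get?_isSome, hg]; rfl
      rw [rankLoopA, if_neg (by simp [hc])]
      exact ih (fun v hv => h v (by simp [hg, hv]))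
    | some x =>
      have hc : d.contains n = true := by
        rw [contains_iff_get?_isSome, hg]; rfl
      have hx : x = r := h x (by simp [hg])
      rw [rankLoopA, if_pos hc]
      simp only [hg, hx]
      rw [if_neg (by simp)]
      exact ih (fun v hv => h v (by simp [hg, hv]))

lemma rankLoopA_char (d : PySem.Dict String String) (names : List String)
    (hne : names.filterMap (fun n => d.get? n) ≠ [])
    (hall : ∀ v ∈ names.filterMap (fun n => d.get? n), v = (names.filterMap (fun n => d.get? n)).headD "") :
    rankLoopA d names none = some (some ((names.filterMap (fun n => d.get? n)).headD "")) := by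
  induction names with
  | nil => exact absurd rfl hne
  | cons n rest ih =>
    cases hg : d.get? n with
    | none =>
      have hc : d.contains n = false := by
        rw [contains_iff_get?_isSome, hg]; rfl
      rw [rankLoopA, if_neg (by simp [hc])]
      have hfm : (n :: rest).filterMap (fun n => d.get? n) = rest.filterMap (fun n => d.get? n) := by
        simp [hg]
      rw [hfm] at hne hall
      rw [hfm]
      exact ih hne hall
    | some x =>
      have hc : d.contains n = true := by
        rw [contains_iff_get?_isSome, hg]; rfl
      have hfm : (n :: rest).filterMap (fun n => d.get? n) = x :: rest.filterMap (fun n => d.get? n) := by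
        simp [hg]
      rw [rankLoopA, if_pos hc]
      simp only [hg]
      rw [hfm] at hall
      simp only [hfm, List.headD_cons]
      exact rankLoopA_some d rest x (fun v hv => hall v (by simp [hv]))

lemma set_ofList_const {l : List String} {c : String} (hne : l ≠ []) (hall : ∀ v ∈ l, v = c) :
    PySem.Set.ofList l = [c] := by
  have aux : ∀ (t : List String), (∀ v ∈ t, v = c) → List.foldl PySem.Set.add [c] t = [c] := by
    intro t ht
    induction t with
    | nil => rfl
    | cons v rest ih =>
      have hv : v = c := ht v (by simp)
      have hstep : PySem.Set.add [c] v = [c] := by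
        simp [PySem.Set.add, PySem.Set.contains, hv]
      rw [List.foldl_cons, hstep]
      exact ih (fun w hw => ht w (by simp [hw]))
  cases l with
  | nil => exact absurd rfl hne
  | cons v rest =>
    have hv : v = c := hall v (by simp)
    have hstep : PySem.Set.add PySem.Set.empty v = [c] := by
      simp [PySem.Set.add, PySem.Set.empty, PySem.Set.contains, hv]
    rw [PySem.Set.ofList, List.foldl_cons, hstep]
    exact aux rest (fun w hw => hall w (by simp [hw]))

-- ===== VERDICT (by name: the statement is the Claim_ definition above) =====
theorem env_mapping_spec : Claim_equal_env_mapping := by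
  intro env rnl lrnl _ hpre
  obtain ⟨h1, h2, h3, h4⟩ := hpre
  unfold Spec_env_mapping env_mapping env_mapping_alt presentVals
  simp only [rankLoopA_char _ _ h1 h2, set_ofList_const h1 h2,
    rankLoopA_char _ _ h3 h4, set_ofList_const h3 h4]
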